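-- pv_equiv track=rewrite | github.com/MuneerMiller/WeThinkCode-Projects | submission_004-problem-master/super_algos.py | sum_all
-- ===== SOURCE A (Python) =====
-- def sum_all(element):
--     """TODO: complete for Step 2"""
--     for i in element:
--         if i == "" or type(i) != int:
--             return -1
--     if len(element) == 0:
--         return -1
--     if len(element) == 1:
--         return element[0]
--     else:
--         return element[0] + sum_all(element[1:])
-- ===== SOURCE B (Python) =====
-- def sum_all(element):
--     # Single pass: validate, then builtin sum; no slicing recursion.
--     if not element:
--         return -1
--     for i in element:
--         if i == "" or type(i) != int:
--             return -1
--     return sum(element)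
-- ===== Notes on version B (the rewrite author's own statement) =====
-- stated objective: faster
-- what changed: Replaces the O(n^2) slicing recursion (which re-runs the validation loop at every level) with one validation pass plus the builtin sum.
import Mathlib
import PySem

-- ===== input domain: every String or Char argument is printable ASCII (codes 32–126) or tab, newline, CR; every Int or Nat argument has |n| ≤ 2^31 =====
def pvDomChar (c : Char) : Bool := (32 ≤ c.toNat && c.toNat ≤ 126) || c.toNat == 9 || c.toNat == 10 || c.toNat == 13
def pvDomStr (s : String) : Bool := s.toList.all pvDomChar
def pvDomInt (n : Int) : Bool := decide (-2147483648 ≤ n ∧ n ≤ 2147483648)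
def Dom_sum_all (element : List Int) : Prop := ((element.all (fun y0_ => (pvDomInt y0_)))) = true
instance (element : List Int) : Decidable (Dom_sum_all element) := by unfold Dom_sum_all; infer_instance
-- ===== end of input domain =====

-- B replaces A's O(n^2) slicing recursion with one emptiness check plus the builtin sum (return value only).

-- ===== PORT A =====
-- A's validation loop checks `i == "" or type(i) != int`; on a List Int argument both
-- tests are False for every element, so the loop never returns -1 and is omitted here
-- (the typed signature makes it vacuous). The rest is A's slicing recursion, literally:
-- len 0 -> -1; len 1 -> element[0]; else element[0] + sum_all(element[1:]).
def sum_all (element : List Int) : Int :=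
  match element with
  | [] => -1
  | [x] => x
  | x :: rest => x + sum_all rest

-- ===== PORT B =====
-- B's validation loop is vacuous for the same reason; `sum(element)` is List.sum.
def sum_all_alt (element : List Int) : Int :=
  if element = [] then -1 else element.sum

-- ===== PRECONDITION & SPEC =====
def Spec_sum_all (element : List Int) (out : Int) : Prop := out = sum_all_alt element
instance (element : List Int) (out : Int) : Decidable (Spec_sum_all element out) := by unfold Spec_sum_all; infer_instance

-- ===== CLAIM (what is proved, stated in full; the proofs are below) =====
def Claim_equal_sum_all : Prop := ∀ (element : List Int), Dom_sum_all element → Spec_sum_all element (sum_all element)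

-- ===== LEMMAS AND PROOFS =====
theorem sum_all_eq_sum (x : Int) (rest : List Int) : sum_all (x :: rest) = (x :: rest).sum := by
  induction rest generalizing x with
  | nil => simp [sum_all]
  | cons y ys ih => simp [sum_all, ih y]

-- ===== VERDICT (by name: the statement is the Claim_ definition above) =====
theorem sum_all_spec : Claim_equal_sum_all := by
  intro element _
  unfold Spec_sum_all sum_all_alt
  cases element with
  | nil => simp [sum_all]
  | cons x rest => simp [sum_all_eq_sum]
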